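-- pv_equiv track=rewrite | github.com/nikkimoteva/NewsSummarizer | Summarizer/summarizer.py | DecreaseLength
-- ===== SOURCE A (Python) =====
-- def DecreaseLength(topHighest):
--     # comparison for length of text, must be within constraint of 300letters or 5sentences.
--     while len(topHighest) > 1:
--         difference = topHighest[-1] - topHighest[0]
--         if difference >= 2:
--             topHighest = topHighest[1:]
--         else:
--             break
--     len_sen = []
--     len_wrd = 0
--     for val in range(len(topHighest)):
--         len_sen.append(topHighest[val])
--         len_wrd += topHighest[val]
--     """if len_wrd > 300:
--         topHighest = topHighest[1:]
--         decrease_length(topHighest)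
--     else:
--         return topHighest"""
--     while -1 in topHighest:
--         topHighest.remove(-1)
--     while 0 in topHighest:
--         topHighest.remove(0)
--     return topHighest
-- ===== SOURCE B (Python) =====
-- def DecreaseLength(topHighest):
--     # Single left scan to find the cut index, then one filtering pass.
--     i = 0
--     n = len(topHighest)
--     if n > 1:
--         last = topHighest[-1]
--         while i < n - 1 and last - topHighest[i] >= 2:
--             i += 1
--     return [v for v in topHighest[i:] if v != -1 and v != 0]
-- ===== Notes on version B (the rewrite author's own statement) =====
-- stated objective: faster
-- what changed: Replaces A's repeated list slicing in the trim loop, the dead len_sen/len_wrd accumulation pass, and the quadratic 'while v in list: list.remove(v)' loops by a single index scan to find the cut point plus one filtering list comprehension.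
import Mathlib
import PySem

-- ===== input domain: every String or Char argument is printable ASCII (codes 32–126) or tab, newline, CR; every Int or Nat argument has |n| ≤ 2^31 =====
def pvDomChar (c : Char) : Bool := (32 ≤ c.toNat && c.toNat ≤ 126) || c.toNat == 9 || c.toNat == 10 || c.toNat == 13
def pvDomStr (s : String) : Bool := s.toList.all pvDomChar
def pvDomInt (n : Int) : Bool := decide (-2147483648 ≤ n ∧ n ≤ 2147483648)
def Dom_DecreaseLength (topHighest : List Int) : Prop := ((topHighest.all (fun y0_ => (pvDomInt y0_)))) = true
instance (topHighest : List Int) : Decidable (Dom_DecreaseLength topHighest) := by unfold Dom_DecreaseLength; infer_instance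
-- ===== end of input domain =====

-- B replaces A's repeated slicing, dead accumulation pass and quadratic remove-loops by one index
-- scan plus one filter (equivalence is about the RETURN value; Python A may mutate its argument via .remove).

-- ===== PORT A =====
-- termination helper for the 'while v in xs: xs.remove(v)' loops
theorem pvRemoveLen {v : Int} {xs : List Int} (h : v ∈ xs) :
    ((PySem.List.remove? xs v).getD xs).length < xs.length := by
  rw [PySem.List.remove?_eq_some_erase xs v h]
  have := List.length_pos_of_mem h
  simp [List.length_erase_of_mem h]
  omega

-- 'while v in topHighest: topHighest.remove(v)'
def pvRemoveAll (v : Int) (xs : List Int) : List Int :=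
  if h : v ∈ xs then pvRemoveAll v ((PySem.List.remove? xs v).getD xs) else xs
termination_by xs.length
decreasing_by exact pvRemoveLen h

-- the first while loop: drop the head while len > 1 and topHighest[-1] - topHighest[0] >= 2
def pvTrim : List Int → List Int
  | a :: b :: rest =>
      let difference := (PySem.List.pyGet? (a :: b :: rest) (-1)).getD 0
        - (PySem.List.pyGet? (a :: b :: rest) 0).getD 0
      if difference ≥ 2 then pvTrim (b :: rest) else a :: b :: rest
  | xs => xs

def DecreaseLength (topHighest : List Int) : List Int :=
  let t := pvTrim topHighest
  -- the dead len_sen / len_wrd accumulation pass of A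
  let _len_sen := t.foldl (fun acc v => acc ++ [v]) ([] : List Int)
  let _len_wrd := t.foldl (fun acc v => acc + v) (0 : Int)
  pvRemoveAll 0 (pvRemoveAll (-1) t)

-- ===== PORT B =====
-- 'while i < n - 1 and last - topHighest[i] >= 2: i += 1'
def pvScan (xs : List Int) (last : Int) (n : Nat) (i : Nat) : Nat :=
  if i < n - 1 ∧ last - PySem.List.pyGetD xs (i : Int) 0 ≥ 2 then pvScan xs last n (i + 1)
  else i
termination_by n - 1 - i
decreasing_by omega

def DecreaseLength_alt (topHighest : List Int) : List Int :=
  let n := topHighest.length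
  let i := if n > 1 then
      pvScan topHighest ((PySem.List.pyGet? topHighest (-1)).getD 0) n 0
    else 0
  (PySem.List.slice topHighest (some (i : Int)) none).filter (fun v => v != -1 && v != 0)

-- ===== PRECONDITION & SPEC =====
def Spec_DecreaseLength (topHighest : List Int) (out : List Int) : Prop := out = DecreaseLength_alt topHighest
instance (topHighest : List Int) (out : List Int) : Decidable (Spec_DecreaseLength topHighest out) := by unfold Spec_DecreaseLength; infer_instance

-- ===== CLAIM (what is proved, stated in full; the proofs are below) =====
def Claim_equal_DecreaseLength : Prop := ∀ (topHighest : List Int), Dom_DecreaseLength topHighest → Spec_DecreaseLength topHighest (DecreaseLength topHighest)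

-- ===== LEMMAS AND PROOFS =====

theorem filter_erase {v : Int} {p : Int → Bool} (hp : p v = false) :
    ∀ xs : List Int, (xs.erase v).filter p = xs.filter p := by
  intro xs
  induction xs with
  | nil => rfl
  | cons a t ih =>
    by_cases hav : a = v
    · subst hav; simp [hp]
    · simp [hav, List.filter_cons, ih]

theorem pvRemoveAll_eq_filter (v : Int) (xs : List Int) :
    pvRemoveAll v xs = xs.filter (fun x => x != v) := by
  fun_induction pvRemoveAll v xs with
  | case1 xs h ih =>
    rw [ih, PySem.List.remove?_eq_some_erase xs v h]
    simpa using filter_erase (v := v) (p := fun x => x != v) (by simp) xs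
  | case2 xs h =>
    rw [List.filter_eq_self.2]
    intro a ha
    simp
    rintro rfl
    exact h ha

theorem key (last : Int) (xs : List Int) :
    ∀ i : Nat, xs.getLast?.getD 0 = last →
      pvTrim (xs.drop i) = xs.drop (pvScan xs last xs.length i) := by
  intro i
  fun_induction pvScan xs last xs.length i with
  | case1 i h ih =>
    intro hlast
    obtain ⟨h1, h2⟩ := h
    have hi : i < xs.length := by omega
    have hi1 : i + 1 < xs.length := by omega
    have hd : xs.drop i = xs[i] :: xs[i+1] :: xs.drop (i + 2) := by
      rw [List.drop_eq_getElem_cons hi, List.drop_eq_getElem_cons hi1]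
    rw [hd]
    rw [pvTrim]
    have hlast2 : ((xs[i] :: xs[i+1] :: xs.drop (i + 2)).getLast?).getD 0 = last := by
      rw [← hd, List.getLast?_drop, if_neg (by omega), hlast]
    have hgi : PySem.List.pyGetD xs (i : Int) 0 = xs[i] := by
      rw [PySem.List.pyGetD_eq_getElem xs 0 (by omega) (by exact_mod_cast hi)]
      simp
    rw [PySem.List.pyGet?_neg_one]
    simp only [PySem.List.pyGet?_zero_cons, Option.getD_some, hlast2]
    rw [if_pos (by rw [hgi] at h2; omega), ← List.drop_eq_getElem_cons hi1]
    exact ih hlast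
  | case2 i h =>
    intro hlast
    match hdi : xs.drop i with
    | [] => rfl
    | [a] => rfl
    | a :: b :: t =>
      have hlen : i + 2 ≤ xs.length := by
        have := congrArg List.length hdi
        simp [List.length_drop] at this
        omega
      have hi : i < xs.length := by omega
      have ha : a = xs[i] := by
        have := List.drop_eq_getElem_cons hi (l := xs)
        rw [hdi] at this
        exact (List.cons.injEq .. ▸ this).1
      have hgi : PySem.List.pyGetD xs (i : Int) 0 = xs[i] := by
        rw [PySem.List.pyGetD_eq_getElem xs 0 (by omega) (by exact_mod_cast hi)]
        simp
      have hne : ¬ (last - xs[i] ≥ 2) := by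
        intro hc
        exact h ⟨by omega, by rw [hgi]; omega⟩
      have hlast2 : ((a :: b :: t).getLast?).getD 0 = last := by
        rw [← hdi, List.getLast?_drop, if_neg (by omega), hlast]
      rw [pvTrim]
      rw [PySem.List.pyGet?_neg_one]
      simp only [PySem.List.pyGet?_zero_cons, Option.getD_some, hlast2]
      rw [if_neg (by rw [ha]; exact hne)]

theorem pvTrim_short (xs : List Int) (h : xs.length ≤ 1) : pvTrim xs = xs := by
  match xs with
  | [] => rfl
  | [a] => rfl
  | a :: b :: t => simp at h

theorem DecreaseLength_spec' : ∀ xs : List Int, DecreaseLength xs = DecreaseLength_alt xs := by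
  intro xs
  show pvRemoveAll 0 (pvRemoveAll (-1) (pvTrim xs)) = _
  rw [pvRemoveAll_eq_filter, pvRemoveAll_eq_filter, List.filter_filter]
  have hP : (fun a : Int => (a != 0) && (a != -1)) = (fun v : Int => (v != -1) && (v != 0)) := by
    funext a; exact Bool.and_comm ..
  rw [hP]
  simp only [DecreaseLength_alt]
  by_cases hn : xs.length > 1
  · rw [if_pos hn, PySem.List.slice_from_natCast,
      ← key ((PySem.List.pyGet? xs (-1)).getD 0) xs 0 (by rw [PySem.List.pyGet?_neg_one]),
      List.drop_zero]
  · rw [if_neg hn, PySem.List.slice_from_natCast, List.drop_zero, pvTrim_short xs (by omega)]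

-- ===== VERDICT (by name: the statement is the Claim_ definition above) =====
theorem DecreaseLength_spec : Claim_equal_DecreaseLength := by
  intro xs _
  exact DecreaseLength_spec' xs
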